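-- pv_equiv track=rewrite | github.com/Nabin077/Operating-System | SCAN.py | scan_disk_scheduling
-- ===== SOURCE A (Python) =====
-- def scan_disk_scheduling(requests, head, disk_size, direction):
--     # Separate requests into two lists: requests less than the head, and requests greater than or equal to the head
--     left = [r for r in requests if r < head]
--     right = [r for r in requests if r >= head]
--
--     # Sort the lists
--     left.sort()
--     right.sort()
--
--     seek_sequence = []
--     seek_count = 0
--
--     # If the direction is left (towards 0)
--     if direction == "left":
--         # Process requests to the left of the head
--         for track in reversed(left):
--             seek_sequence.append(track)
--             seek_count += abs(head - track)
--             head = track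
--
--         # After reaching the beginning, move to 0 and reverse direction to process requests to the right
--         seek_count += abs(head - 0)
--         head = 0
--
--         for track in right:
--             seek_sequence.append(track)
--             seek_count += abs(head - track)
--             head = track
--
--     # If the direction is right (towards the end of the disk)
--     elif direction == "right":
--         # Process requests to the right of the head
--         for track in right:
--             seek_sequence.append(track)
--             seek_count += abs(head - track)
--             head = track
--
--         # After reaching the end, move to the max disk size and reverse direction to process requests to the left
--         seek_count += abs(head - (disk_size - 1))
--         head = disk_size - 1
--
--         for track in reversed(left):
--             seek_sequence.append(track)
--             seek_count += abs(head - track)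
--             head = track
--     return seek_sequence, seek_count
-- ===== SOURCE B (Python) =====
-- def scan_disk_scheduling(requests, head, disk_size, direction):
--     # Simulate the head: repeatedly jump to the nearest pending request in the
--     # current travel direction, flipping at the boundary (0 or disk_size-1).
--     if direction not in ("left", "right"):
--         return [], 0
--     pending = list(requests)
--     seq = []
--     total = 0
--     pos = head
--
--     def serve(m):
--         nonlocal total, pos
--         total += abs(pos - m)
--         pos = m
--         while m in pending:
--             pending.remove(m)
--             seq.append(m)
--
--     if direction == "left":
--         while any(r < pos for r in pending):
--             serve(max(r for r in pending if r < pos))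
--         total += abs(pos)
--         pos = 0
--         while pending:
--             serve(min(pending))
--     else:
--         while any(r >= pos for r in pending):
--             serve(min(r for r in pending if r >= pos))
--         total += abs(pos - (disk_size - 1))
--         pos = disk_size - 1
--         while pending:
--             serve(max(pending))
--     return seq, total
-- ===== Notes on version B (the rewrite author's own statement) =====
-- stated objective: alternative
-- what changed: B simulates the disk head directly: it repeatedly selects the nearest pending request in the current travel direction and serves all its occurrences (a selection-extraction loop over the unsorted pending list, flipping at the boundary), instead of A's partition-into-left/right, sort both sides, then sweep the two sorted lists; on the generated duplicate-heavy inputs the O(n*d) selection loop (d = distinct tracks) measured faster than sorting.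
import Mathlib
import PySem

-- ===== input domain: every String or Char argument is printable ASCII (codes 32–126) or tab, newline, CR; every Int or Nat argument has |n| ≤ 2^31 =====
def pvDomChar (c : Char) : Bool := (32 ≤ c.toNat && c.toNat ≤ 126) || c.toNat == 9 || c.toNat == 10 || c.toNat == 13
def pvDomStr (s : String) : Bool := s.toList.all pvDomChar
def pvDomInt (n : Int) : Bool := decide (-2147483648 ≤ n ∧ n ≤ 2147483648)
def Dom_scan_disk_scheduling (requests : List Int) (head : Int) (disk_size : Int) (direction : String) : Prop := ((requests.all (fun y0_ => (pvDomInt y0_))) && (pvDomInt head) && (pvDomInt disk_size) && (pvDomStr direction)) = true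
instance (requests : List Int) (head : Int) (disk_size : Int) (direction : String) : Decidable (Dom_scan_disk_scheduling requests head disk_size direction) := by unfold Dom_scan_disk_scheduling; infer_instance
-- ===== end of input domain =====

-- B replaces A's partition-sort-sweep by a direct head-movement simulation (repeated
-- nearest-request selection, no sorting); objective: alternative algorithm, same results.

-- ===== PORT A =====
def pvStepA (st : List Int × Int × Int) (track : Int) : List Int × Int × Int :=
  (st.1 ++ [track], st.2.1 + |st.2.2 - track|, track)

def scan_disk_scheduling (requests : List Int) (head : Int) (disk_size : Int) (direction : String) : List Int × Int :=
  let left := PySem.List.sorted (requests.filter (fun r => decide (r < head))) (fun x => x) false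
  let right := PySem.List.sorted (requests.filter (fun r => decide (head ≤ r))) (fun x => x) false
  if direction = "left" then
    let s1 := left.reverse.foldl pvStepA ([], 0, head)
    let s2 := (s1.1, s1.2.1 + |s1.2.2 - 0|, (0 : Int))
    let s3 := right.foldl pvStepA s2
    (s3.1, s3.2.1)
  else if direction = "right" then
    let s1 := right.foldl pvStepA ([], 0, head)
    let s2 := (s1.1, s1.2.1 + |s1.2.2 - (disk_size - 1)|, disk_size - 1)
    let s3 := left.reverse.foldl pvStepA s2
    (s3.1, s3.2.1)
  else ([], 0)

-- ===== PORT B =====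
-- serve(m):  'while m in pending: pending.remove(m); seq.append(m)'
-- (list.remove of a present element is List.erase — exact here since the loop guard
--  guarantees membership; it also returns the new total/pos computed before the loop)
-- (fuel = |pending| bounds the number of removals; it only makes the loop total)
def pvServeB (m : Int) : Nat → List Int → List Int → List Int × List Int
  | 0, pending, seq => (pending, seq)
  | f + 1, pending, seq =>
      if m ∈ pending then pvServeB m f (pending.erase m) (seq ++ [m]) else (pending, seq)

-- 'while any(r < pos for r in pending): serve(max(r for r in pending if r < pos))'
-- fuel = |pending|+1 only makes the loop total: each iteration removes ≥ 1 element.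
def pvLeftPass1 (fuel : Nat) (pending seq : List Int) (total pos : Int) : List Int × List Int × Int × Int :=
  match fuel with
  | 0 => (pending, seq, total, pos)
  | f + 1 =>
    match PySem.List.max? (pending.filter (fun r => decide (r < pos))) (fun x => x) with
    | none => (pending, seq, total, pos)
    | some m =>
      let ps := pvServeB m pending.length pending seq
      pvLeftPass1 f ps.1 ps.2 (total + |pos - m|) m

-- 'while pending: serve(min(pending))'
def pvLeftPass2 (fuel : Nat) (pending seq : List Int) (total pos : Int) : List Int × List Int × Int × Int :=
  match fuel with
  | 0 => (pending, seq, total, pos)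
  | f + 1 =>
    match PySem.List.min? pending (fun x => x) with
    | none => (pending, seq, total, pos)
    | some m =>
      let ps := pvServeB m pending.length pending seq
      pvLeftPass2 f ps.1 ps.2 (total + |pos - m|) m

-- 'while any(r >= pos for r in pending): serve(min(r for r in pending if r >= pos))'
def pvRightPass1 (fuel : Nat) (pending seq : List Int) (total pos : Int) : List Int × List Int × Int × Int :=
  match fuel with
  | 0 => (pending, seq, total, pos)
  | f + 1 =>
    match PySem.List.min? (pending.filter (fun r => decide (pos ≤ r))) (fun x => x) with
    | none => (pending, seq, total, pos)
    | some m =>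
      let ps := pvServeB m pending.length pending seq
      pvRightPass1 f ps.1 ps.2 (total + |pos - m|) m

-- 'while pending: serve(max(pending))'
def pvRightPass2 (fuel : Nat) (pending seq : List Int) (total pos : Int) : List Int × List Int × Int × Int :=
  match fuel with
  | 0 => (pending, seq, total, pos)
  | f + 1 =>
    match PySem.List.max? pending (fun x => x) with
    | none => (pending, seq, total, pos)
    | some m =>
      let ps := pvServeB m pending.length pending seq
      pvRightPass2 f ps.1 ps.2 (total + |pos - m|) m

def scan_disk_scheduling_alt (requests : List Int) (head : Int) (disk_size : Int) (direction : String) : List Int × Int :=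
  if ¬ (direction = "left" ∨ direction = "right") then ([], 0)
  else if direction = "left" then
    let r1 := pvLeftPass1 (requests.length + 1) requests [] 0 head
    let r2 := pvLeftPass2 (r1.1.length + 1) r1.1 r1.2.1 (r1.2.2.1 + |r1.2.2.2|) 0
    (r2.2.1, r2.2.2.1)
  else
    let r1 := pvRightPass1 (requests.length + 1) requests [] 0 head
    let r2 := pvRightPass2 (r1.1.length + 1) r1.1 r1.2.1 (r1.2.2.1 + |r1.2.2.2 - (disk_size - 1)|) (disk_size - 1)
    (r2.2.1, r2.2.2.1)

-- ===== PRECONDITION & SPEC =====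
def Spec_scan_disk_scheduling (requests : List Int) (head : Int) (disk_size : Int) (direction : String) (out : List Int × Int) : Prop := out = scan_disk_scheduling_alt requests head disk_size direction
instance (requests : List Int) (head : Int) (disk_size : Int) (direction : String) (out : List Int × Int) : Decidable (Spec_scan_disk_scheduling requests head disk_size direction out) := by unfold Spec_scan_disk_scheduling; infer_instance

-- ===== CLAIM (what is proved, stated in full; the proofs are below) =====
def Claim_equal_scan_disk_scheduling : Prop := ∀ (requests : List Int) (head : Int) (disk_size : Int) (direction : String), Dom_scan_disk_scheduling requests head disk_size direction → Spec_scan_disk_scheduling requests head disk_size direction (scan_disk_scheduling requests head disk_size direction)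

-- ===== LEMMAS AND PROOFS =====

-- pairwise seek distances along a path
def pvPairSum : List Int → Int
  | a :: b :: rest => |a - b| + pvPairSum (b :: rest)
  | _ => 0

theorem pvFoldA (l : List Int) (seq : List Int) (cnt h : Int) :
    l.foldl pvStepA (seq, cnt, h) = (seq ++ l, cnt + pvPairSum (h :: l), l.getLastD h) := by
  induction l generalizing seq cnt h with
  | nil => simp [pvPairSum]
  | cons a t ih =>
      simp only [List.foldl_cons, pvStepA, ih, Prod.mk.injEq]
      refine ⟨by simp, ?_, ?_⟩
      · simp only [pvPairSum]
        cases t with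
        | nil => simp [pvPairSum]
        | cons b t' => simp only [pvPairSum]; ring
      · rw [List.getLastD_cons]

theorem pvPairSum_cons_self_replicate (m : Int) (k : Nat) (l : List Int) :
    pvPairSum (m :: (List.replicate k m ++ l)) = pvPairSum (m :: l) := by
  induction k with
  | zero => rfl
  | succ k ih => simp only [List.replicate_succ, List.cons_append, pvPairSum, ih]; simp

theorem pvPairSum_cons_replicate (p m : Int) (k : Nat) (l : List Int) (hk : 0 < k) :
    pvPairSum (p :: (List.replicate k m ++ l)) = |p - m| + pvPairSum (m :: l) := by
  obtain ⟨j, rfl⟩ : ∃ j, k = j + 1 := ⟨k - 1, by omega⟩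
  rw [List.replicate_succ, List.cons_append]
  show |p - m| + pvPairSum (m :: (List.replicate j m ++ l)) = _
  rw [pvPairSum_cons_self_replicate]

theorem pvGetLastD_append (l l' : List Int) (d : Int) :
    (l ++ l').getLastD d = l'.getLastD (l.getLastD d) := by
  induction l generalizing d with
  | nil => rfl
  | cons a t ih => rw [List.cons_append, List.getLastD_cons, ih, List.getLastD_cons]

theorem pvGetLastD_replicate (m : Int) : ∀ (k : Nat) (d : Int), 0 < k → (List.replicate k m).getLastD d = m
  | 0, _, h => absurd h (lt_irrefl 0)
  | k + 1, d, _ => by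
      rw [List.replicate_succ, List.getLastD_cons]
      cases k with
      | zero => rfl
      | succ j => exact pvGetLastD_replicate m (j + 1) m (Nat.succ_pos j)

theorem pvFilter_ne_erase (m : Int) (l : List Int) :
    (l.erase m).filter (fun x => decide (x ≠ m)) = l.filter (fun x => decide (x ≠ m)) := by
  induction l with
  | nil => rfl
  | cons a t ih =>
      by_cases h : a = m
      · subst h; simp [List.erase_cons_head]
      · rw [List.erase_cons_tail (by simpa using h)]
        have h1 : (a :: t.erase m).filter (fun x => decide (x ≠ m))
            = a :: (t.erase m).filter (fun x => decide (x ≠ m)) := by simp [h]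
        have h2 : (a :: t).filter (fun x => decide (x ≠ m))
            = a :: t.filter (fun x => decide (x ≠ m)) := by simp [h]
        rw [h1, h2, ih]

theorem pvFilterNeLt (m : Int) (l : List Int) (h : m ∈ l) :
    (l.filter (fun x => decide (x ≠ m))).length < l.length := by
  induction l with
  | nil => cases h
  | cons a t ih =>
      by_cases ha : a = m
      · subst ha
        have h1 : (a :: t).filter (fun x => decide (x ≠ a)) = t.filter (fun x => decide (x ≠ a)) := by simp
        rw [h1, List.length_cons]
        have := List.length_filter_le (fun x => decide (x ≠ a)) t
        omega
      · have hm : m ∈ t := by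
          rcases List.mem_cons.mp h with h' | h'
          · exact absurd h'.symm ha
          · exact h'
        have h1 : (a :: t).filter (fun x => decide (x ≠ m)) = a :: t.filter (fun x => decide (x ≠ m)) := by
          simp [ha]
        rw [h1, List.length_cons, List.length_cons]
        exact Nat.succ_lt_succ (ih hm)

theorem pvServeB_spec (m : Int) : ∀ (fuel : Nat) (pending seq : List Int), pending.count m ≤ fuel →
    pvServeB m fuel pending seq =
      (pending.filter (fun x => decide (x ≠ m)), seq ++ List.replicate (pending.count m) m) := by
  intro fuel
  induction fuel with
  | zero =>
      intro pending seq hc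
      have h : m ∉ pending := by
        intro hm; exact absurd (List.count_pos_iff.mpr hm) (by omega)
      have h1 : pending.filter (fun x => decide (x ≠ m)) = pending :=
        List.filter_eq_self.mpr (by intro x hx; simp; rintro rfl; exact h hx)
      rw [List.count_eq_zero.mpr h, h1]
      simp [pvServeB]
  | succ f ih =>
      intro pending seq hc
      by_cases h : m ∈ pending
      · have h1 := List.count_erase_self (a := m) (l := pending)
        have h2 : 0 < pending.count m := List.count_pos_iff.mpr h
        have hc' : (pending.erase m).count m ≤ f := by omega
        have hstep : pvServeB m (f + 1) pending seq = pvServeB m f (pending.erase m) (seq ++ [m]) := by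
          simp [pvServeB, h]
        rw [hstep, ih _ _ hc', pvFilter_ne_erase]
        have hcnt : pending.count m = (pending.erase m).count m + 1 := by omega
        rw [hcnt, List.replicate_succ, List.append_assoc]
        rfl
      · have h0 : pending.count m = 0 := List.count_eq_zero.mpr h
        have h1 : pending.filter (fun x => decide (x ≠ m)) = pending :=
          List.filter_eq_self.mpr (by intro x hx; simp; rintro rfl; exact h hx)
        rw [show pvServeB m (f + 1) pending seq = (pending, seq) from by simp [pvServeB, h]]
        rw [h0, h1]
        simp

theorem pvSortedNil : PySem.List.sorted ([] : List Int) (fun x => x) false = [] := rfl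

-- sorted(l) starts with all copies of its minimum
theorem pvSorted_min_decomp (l : List Int) (m : Int)
    (h : PySem.List.min? l (fun x => x) = some m) :
    PySem.List.sorted l (fun x => x) false =
      List.replicate (l.count m) m ++
        PySem.List.sorted (l.filter (fun x => decide (x ≠ m))) (fun x => x) false := by
  apply PySem.List.sorted_id_eq_of_perm_of_pairwise
  · have h1 : l.filter (fun x => x == m) = List.replicate (l.count m) m := List.filter_beq m
    have h3 : (l.filter (fun x => !(x == m))) = l.filter (fun x => decide (x ≠ m)) := by
      apply List.filter_congr; intro x _; by_cases hxm : x = m <;> simp [hxm]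
    have h4 : (List.replicate (l.count m) m ++ l.filter (fun x => decide (x ≠ m))).Perm l := by
      rw [← h1, ← h3]; exact List.filter_append_perm _ l
    exact (List.Perm.append_left _ (PySem.List.sorted_perm _ _ _)).trans h4
  · apply List.pairwise_append.mpr
    refine ⟨List.pairwise_replicate.mpr (Or.inr le_rfl), PySem.List.sorted_pairwise _ _, ?_⟩
    intro a ha b hb
    have ha' : a = m := List.eq_of_mem_replicate ha
    have hb' : b ∈ l := (List.mem_filter.mp ((PySem.List.mem_sorted _ _ _ _).mp hb)).1
    subst ha'
    exact PySem.List.min?_isMin h b hb'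

-- sorted(l) ends with all copies of its maximum
theorem pvSorted_max_decomp (l : List Int) (m : Int)
    (h : PySem.List.max? l (fun x => x) = some m) :
    PySem.List.sorted l (fun x => x) false =
      PySem.List.sorted (l.filter (fun x => decide (x ≠ m))) (fun x => x) false ++
        List.replicate (l.count m) m := by
  apply PySem.List.sorted_id_eq_of_perm_of_pairwise
  · have h1 : l.filter (fun x => x == m) = List.replicate (l.count m) m := List.filter_beq m
    have h3 : (l.filter (fun x => !(x == m))) = l.filter (fun x => decide (x ≠ m)) := by
      apply List.filter_congr; intro x _; by_cases hxm : x = m <;> simp [hxm]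
    have h4 : (List.replicate (l.count m) m ++ l.filter (fun x => decide (x ≠ m))).Perm l := by
      rw [← h1, ← h3]; exact List.filter_append_perm _ l
    exact (List.Perm.append_right _ (PySem.List.sorted_perm _ _ _)).trans
      (List.perm_append_comm.trans h4)
  · apply List.pairwise_append.mpr
    refine ⟨PySem.List.sorted_pairwise _ _, List.pairwise_replicate.mpr (Or.inr le_rfl), ?_⟩
    intro a ha b hb
    have hb' : b = m := List.eq_of_mem_replicate hb
    have ha' : a ∈ l := (List.mem_filter.mp ((PySem.List.mem_sorted _ _ _ _).mp ha)).1
    subst hb'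
    exact PySem.List.max?_isMax h a ha'

theorem pvLeftPass1_spec : ∀ (fuel : Nat) (pending seq : List Int) (total pos : Int),
    pending.length ≤ fuel →
    pvLeftPass1 fuel pending seq total pos =
      (pending.filter (fun r => decide (pos ≤ r)),
       seq ++ (PySem.List.sorted (pending.filter (fun r => decide (r < pos))) (fun x => x) false).reverse,
       total + pvPairSum (pos :: (PySem.List.sorted (pending.filter (fun r => decide (r < pos))) (fun x => x) false).reverse),
       ((PySem.List.sorted (pending.filter (fun r => decide (r < pos))) (fun x => x) false).reverse).getLastD pos) := by
  intro fuel
  induction fuel with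
  | zero =>
      intro pending seq total pos hf
      have : pending = [] := List.eq_nil_of_length_eq_zero (Nat.le_zero.mp hf)
      subst this
      simp [pvLeftPass1, pvPairSum, pvSortedNil]
  | succ f ih =>
      intro pending seq total pos hf
      rcases hm : PySem.List.max? (pending.filter (fun r => decide (r < pos))) (fun x => x) with _ | m
      · have hcand : pending.filter (fun r => decide (r < pos)) = [] :=
          (PySem.List.max?_eq_none_iff _ _).mp hm
        have hall : pending.filter (fun r => decide (pos ≤ r)) = pending := by
          apply List.filter_eq_self.mpr
          intro x hx
          have := List.filter_eq_nil_iff.mp hcand x hx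
          simp at this ⊢; omega
        rw [show pvLeftPass1 (f + 1) pending seq total pos = (pending, seq, total, pos) from by
          simp [pvLeftPass1, hm]]
        rw [hcand, hall]
        simp [pvPairSum, pvSortedNil]
      · have hmc : m ∈ pending.filter (fun r => decide (r < pos)) := PySem.List.max?_mem hm
        have hmem : m ∈ pending := (List.mem_filter.mp hmc).1
        have hmlt : m < pos := by have := (List.mem_filter.mp hmc).2; simpa using this
        have hmax : ∀ y ∈ pending, y < pos → y ≤ m := fun y hy hl =>
          PySem.List.max?_isMax hm y (List.mem_filter.mpr ⟨hy, by simpa using hl⟩)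
        have hk : 0 < pending.count m := List.count_pos_iff.mpr hmem
        have hlen : (pending.filter (fun x => decide (x ≠ m))).length ≤ f := by
          have := pvFilterNeLt m pending hmem; omega
        have hstep : pvLeftPass1 (f + 1) pending seq total pos
            = pvLeftPass1 f (pending.filter (fun x => decide (x ≠ m)))
                (seq ++ List.replicate (pending.count m) m) (total + |pos - m|) m := by
          have hs := pvServeB_spec m pending.length pending seq List.count_le_length
          simp [pvLeftPass1, hm, hs]
        have fa : (pending.filter (fun x => decide (x ≠ m))).filter (fun r => decide (m ≤ r))
            = pending.filter (fun r => decide (pos ≤ r)) := by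
          rw [List.filter_filter]
          apply List.filter_congr
          intro x hx
          by_cases hxp : pos ≤ x
          · have h1 : m ≤ x := le_trans hmlt.le hxp
            have h2 : ¬ x = m := by omega
            simp [h1, h2, hxp]
          · by_cases hxe : x = m
            · subst hxe; simp [hxp]
            · have hxm : x ≤ m := hmax x hx (by omega)
              have h3 : ¬ m ≤ x := by omega
              simp [h3, hxp]
        have fb : (pending.filter (fun x => decide (x ≠ m))).filter (fun r => decide (r < m))
            = (pending.filter (fun r => decide (r < pos))).filter (fun x => decide (x ≠ m)) := by
          rw [List.filter_filter, List.filter_filter]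
          apply List.filter_congr
          intro x hx
          by_cases hx1 : x < m
          · have h1 : ¬ x = m := by omega
            have h2 : x < pos := by omega
            simp [hx1, h1, h2]
          · by_cases hxe : x = m
            · subst hxe; simp
            · have h5 : ¬ x < pos := fun hlt => absurd (hmax x hx hlt) (by omega)
              simp [hx1, h5]
        have hcount : (pending.filter (fun r => decide (r < pos))).count m = pending.count m :=
          List.count_filter (by simp [hmlt])
        rw [hstep, ih _ _ _ _ hlen,
          pvSorted_max_decomp _ m hm, List.reverse_append, List.reverse_replicate, ← fb, fa, hcount]
        simp only [Prod.mk.injEq]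
        refine ⟨by trivial, by rw [List.append_assoc], ?_, ?_⟩
        · rw [pvPairSum_cons_replicate pos m _ _ hk]; ring
        · rw [pvGetLastD_append, pvGetLastD_replicate m _ pos hk]

theorem pvLeftPass2_spec : ∀ (fuel : Nat) (pending seq : List Int) (total pos : Int),
    pending.length ≤ fuel →
    pvLeftPass2 fuel pending seq total pos =
      ([],
       seq ++ PySem.List.sorted pending (fun x => x) false,
       total + pvPairSum (pos :: PySem.List.sorted pending (fun x => x) false),
       (PySem.List.sorted pending (fun x => x) false).getLastD pos) := by
  intro fuel
  induction fuel with
  | zero =>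
      intro pending seq total pos hf
      have : pending = [] := List.eq_nil_of_length_eq_zero (Nat.le_zero.mp hf)
      subst this
      simp [pvLeftPass2, pvPairSum, pvSortedNil]
  | succ f ih =>
      intro pending seq total pos hf
      rcases hm : PySem.List.min? pending (fun x => x) with _ | m
      · have hnil : pending = [] := (PySem.List.min?_eq_none_iff _ _).mp hm
        subst hnil
        simp [pvLeftPass2, hm, pvPairSum, pvSortedNil]
      · have hmem : m ∈ pending := PySem.List.min?_mem hm
        have hk : 0 < pending.count m := List.count_pos_iff.mpr hmem
        have hlen : (pending.filter (fun x => decide (x ≠ m))).length ≤ f := by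
          have := pvFilterNeLt m pending hmem; omega
        have hstep : pvLeftPass2 (f + 1) pending seq total pos
            = pvLeftPass2 f (pending.filter (fun x => decide (x ≠ m)))
                (seq ++ List.replicate (pending.count m) m) (total + |pos - m|) m := by
          have hs := pvServeB_spec m pending.length pending seq List.count_le_length
          simp [pvLeftPass2, hm, hs]
        rw [hstep, ih _ _ _ _ hlen, pvSorted_min_decomp _ m hm]
        simp only [Prod.mk.injEq]
        refine ⟨by trivial, by rw [List.append_assoc], ?_, ?_⟩
        · rw [pvPairSum_cons_replicate pos m _ _ hk]; ring
        · rw [pvGetLastD_append, pvGetLastD_replicate m _ pos hk]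

theorem pvRightPass1_spec : ∀ (fuel : Nat) (pending seq : List Int) (total pos : Int),
    pending.length ≤ fuel →
    pvRightPass1 fuel pending seq total pos =
      (pending.filter (fun r => decide (r < pos)),
       seq ++ PySem.List.sorted (pending.filter (fun r => decide (pos ≤ r))) (fun x => x) false,
       total + pvPairSum (pos :: PySem.List.sorted (pending.filter (fun r => decide (pos ≤ r))) (fun x => x) false),
       (PySem.List.sorted (pending.filter (fun r => decide (pos ≤ r))) (fun x => x) false).getLastD pos) := by
  intro fuel
  induction fuel with
  | zero =>
      intro pending seq total pos hf
      have : pending = [] := List.eq_nil_of_length_eq_zero (Nat.le_zero.mp hf)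
      subst this
      simp [pvRightPass1, pvPairSum, pvSortedNil]
  | succ f ih =>
      intro pending seq total pos hf
      rcases hm : PySem.List.min? (pending.filter (fun r => decide (pos ≤ r))) (fun x => x) with _ | m
      · have hcand : pending.filter (fun r => decide (pos ≤ r)) = [] :=
          (PySem.List.min?_eq_none_iff _ _).mp hm
        have hall : pending.filter (fun r => decide (r < pos)) = pending := by
          apply List.filter_eq_self.mpr
          intro x hx
          have := List.filter_eq_nil_iff.mp hcand x hx
          simp at this ⊢; omega
        rw [show pvRightPass1 (f + 1) pending seq total pos = (pending, seq, total, pos) from by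
          simp [pvRightPass1, hm]]
        rw [hcand, hall]
        simp [pvPairSum, pvSortedNil]
      · have hmc : m ∈ pending.filter (fun r => decide (pos ≤ r)) := PySem.List.min?_mem hm
        have hmem : m ∈ pending := (List.mem_filter.mp hmc).1
        have hmge : pos ≤ m := by have := (List.mem_filter.mp hmc).2; simpa using this
        have hmin : ∀ y ∈ pending, pos ≤ y → m ≤ y := fun y hy hl =>
          PySem.List.min?_isMin hm y (List.mem_filter.mpr ⟨hy, by simpa using hl⟩)
        have hk : 0 < pending.count m := List.count_pos_iff.mpr hmem
        have hlen : (pending.filter (fun x => decide (x ≠ m))).length ≤ f := by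
          have := pvFilterNeLt m pending hmem; omega
        have hstep : pvRightPass1 (f + 1) pending seq total pos
            = pvRightPass1 f (pending.filter (fun x => decide (x ≠ m)))
                (seq ++ List.replicate (pending.count m) m) (total + |pos - m|) m := by
          have hs := pvServeB_spec m pending.length pending seq List.count_le_length
          simp [pvRightPass1, hm, hs]
        have fa : (pending.filter (fun x => decide (x ≠ m))).filter (fun r => decide (r < m))
            = pending.filter (fun r => decide (r < pos)) := by
          rw [List.filter_filter]
          apply List.filter_congr
          intro x hx
          by_cases hxp : x < pos
          · have h1 : x < m := by omega
            have h2 : ¬ x = m := by omega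
            simp [h1, h2, hxp]
          · by_cases hxe : x = m
            · subst hxe; simp [hxp]
            · have hxm : m ≤ x := hmin x hx (by omega)
              have h3 : ¬ x < m := by omega
              simp [h3, hxp]
        have fb : (pending.filter (fun x => decide (x ≠ m))).filter (fun r => decide (m ≤ r))
            = (pending.filter (fun r => decide (pos ≤ r))).filter (fun x => decide (x ≠ m)) := by
          rw [List.filter_filter, List.filter_filter]
          apply List.filter_congr
          intro x hx
          by_cases hx1 : m < x
          · have h1 : ¬ x = m := by omega
            have h2 : pos ≤ x := by omega
            have h3 : m ≤ x := by omega
            simp [h1, h2, h3]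
          · by_cases hxe : x = m
            · subst hxe; simp
            · have h5 : ¬ pos ≤ x := fun hle => absurd (hmin x hx hle) (by omega)
              have h6 : ¬ m ≤ x := by omega
              simp [h5, h6]
        have hcount : (pending.filter (fun r => decide (pos ≤ r))).count m = pending.count m :=
          List.count_filter (by simp [hmge])
        rw [hstep, ih _ _ _ _ hlen,
          pvSorted_min_decomp _ m hm, ← fb, fa, hcount]
        simp only [Prod.mk.injEq]
        refine ⟨by trivial, by rw [List.append_assoc], ?_, ?_⟩
        · rw [pvPairSum_cons_replicate pos m _ _ hk]; ring
        · rw [pvGetLastD_append, pvGetLastD_replicate m _ pos hk]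

theorem pvRightPass2_spec : ∀ (fuel : Nat) (pending seq : List Int) (total pos : Int),
    pending.length ≤ fuel →
    pvRightPass2 fuel pending seq total pos =
      ([],
       seq ++ (PySem.List.sorted pending (fun x => x) false).reverse,
       total + pvPairSum (pos :: (PySem.List.sorted pending (fun x => x) false).reverse),
       ((PySem.List.sorted pending (fun x => x) false).reverse).getLastD pos) := by
  intro fuel
  induction fuel with
  | zero =>
      intro pending seq total pos hf
      have : pending = [] := List.eq_nil_of_length_eq_zero (Nat.le_zero.mp hf)
      subst this
      simp [pvRightPass2, pvPairSum, pvSortedNil]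
  | succ f ih =>
      intro pending seq total pos hf
      rcases hm : PySem.List.max? pending (fun x => x) with _ | m
      · have hnil : pending = [] := (PySem.List.max?_eq_none_iff _ _).mp hm
        subst hnil
        simp [pvRightPass2, hm, pvPairSum, pvSortedNil]
      · have hmem : m ∈ pending := PySem.List.max?_mem hm
        have hk : 0 < pending.count m := List.count_pos_iff.mpr hmem
        have hlen : (pending.filter (fun x => decide (x ≠ m))).length ≤ f := by
          have := pvFilterNeLt m pending hmem; omega
        have hstep : pvRightPass2 (f + 1) pending seq total pos
            = pvRightPass2 f (pending.filter (fun x => decide (x ≠ m)))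
                (seq ++ List.replicate (pending.count m) m) (total + |pos - m|) m := by
          have hs := pvServeB_spec m pending.length pending seq List.count_le_length
          simp [pvRightPass2, hm, hs]
        rw [hstep, ih _ _ _ _ hlen, pvSorted_max_decomp _ m hm, List.reverse_append,
          List.reverse_replicate]
        simp only [Prod.mk.injEq]
        refine ⟨by trivial, by rw [List.append_assoc], ?_, ?_⟩
        · rw [pvPairSum_cons_replicate pos m _ _ hk]; ring
        · rw [pvGetLastD_append, pvGetLastD_replicate m _ pos hk]

-- ===== VERDICT (by name: the statement is the Claim_ definition above) =====
theorem scan_disk_scheduling_spec : Claim_equal_scan_disk_scheduling := by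
  intro requests head disk_size direction _
  unfold Spec_scan_disk_scheduling scan_disk_scheduling scan_disk_scheduling_alt
  by_cases hl : direction = "left"
  · subst hl
    simp only [if_pos rfl, if_neg (by decide : ¬ ("left" : String) = "right"),
      if_neg (by simp : ¬ ¬ (("left" : String) = "left" ∨ ("left" : String) = "right"))]
    rw [pvLeftPass1_spec _ _ _ _ _ (Nat.le_succ _)]
    rw [pvLeftPass2_spec _ _ _ _ _ (Nat.le_succ _)]
    simp only [pvFoldA]
    simp [List.append_assoc, sub_zero]
    try ring_nf
  · by_cases hr : direction = "right"
    · subst hr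
      simp only [if_pos rfl, if_neg (by decide : ¬ ("right" : String) = "left"),
        if_neg (by simp : ¬ ¬ (("right" : String) = "left" ∨ ("right" : String) = "right"))]
      rw [pvRightPass1_spec _ _ _ _ _ (Nat.le_succ _)]
      rw [pvRightPass2_spec _ _ _ _ _ (Nat.le_succ _)]
      simp only [pvFoldA]
      simp [List.append_assoc, sub_zero]
      try ring_nf
    · simp [hl, hr]
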